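-- pv_equiv track=rewrite | github.com/piotrrusak/how_to_get_to | utils/path_utils.py | find_full_path
-- ===== SOURCE A (Python) =====
-- def find_full_path(path, lines) :
--     full_path = []
--
--     path_parts = []
--
--     for i in range(0, len(path), 2) :
--         path_parts.append([path[i], path[i+1]])
--     for part in path_parts :
--         start_point, _, line = part[0]
--         end_point = part[1][0]
--         add = False
--         for point in lines[line] :
--             if point[0] == start_point :
--                 add = True
--             if add :
--                 full_path.append((point[0], line))
--             if point[0] == end_point :
--                 break
--
--     return full_path
-- ===== SOURCE B (Python) =====
-- def _segment(a, b, lines):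
--     start_point, line, end_point = a[0], a[2], b[0]
--     keys = [p[0] for p in lines[line]]
--     if start_point not in keys:
--         return []
--     s = keys.index(start_point)
--     e = keys.index(end_point) if end_point in keys else len(keys) - 1
--     if e < s:
--         return []
--     return [(k, line) for k in keys[s:e + 1]]
--
--
-- def find_full_path(path, lines):
--     full_path = []
--     for a, b in zip(path[::2], path[1::2]):
--         full_path += _segment(a, b, lines)
--     return full_path
-- ===== Notes on version B (the rewrite author's own statement) =====
-- stated objective: alternative
-- what changed: A pairs the path via an index range loop and emits points with a boolean add-flag single pass that appends between start and a break at end; B zips path[::2] with path[1::2], locates the start and end indices with index() and emits one slice keys[s:e+1] per segment, skipping it when start is absent or the first end occurrence precedes start.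
import Mathlib
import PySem

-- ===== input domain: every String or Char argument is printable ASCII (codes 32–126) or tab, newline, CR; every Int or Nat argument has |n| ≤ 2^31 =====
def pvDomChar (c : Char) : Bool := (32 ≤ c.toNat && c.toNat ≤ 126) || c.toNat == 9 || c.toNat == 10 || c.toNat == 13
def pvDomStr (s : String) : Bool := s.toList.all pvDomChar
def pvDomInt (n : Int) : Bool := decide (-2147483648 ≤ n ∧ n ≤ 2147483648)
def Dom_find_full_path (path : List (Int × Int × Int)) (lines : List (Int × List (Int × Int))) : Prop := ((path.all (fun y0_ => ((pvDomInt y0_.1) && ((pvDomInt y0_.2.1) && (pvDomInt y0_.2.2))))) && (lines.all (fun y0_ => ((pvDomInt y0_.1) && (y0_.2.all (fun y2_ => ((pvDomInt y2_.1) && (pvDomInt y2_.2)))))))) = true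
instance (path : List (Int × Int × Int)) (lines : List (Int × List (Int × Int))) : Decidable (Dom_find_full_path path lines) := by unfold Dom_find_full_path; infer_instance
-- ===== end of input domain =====

-- B replaces A's boolean-flag single pass per segment by a locate-boundaries-then-slice
-- decomposition over zip(path[::2], path[1::2]); objective: alternative decomposition, same cost.


-- ===== PORT A =====
-- inner 'for point in lines[line]' loop of A: add flag, conditional append, break at end_point
def pvALoop (startP endP line : Int) : List (Int × Int) → Bool → List (Int × Int) → List (Int × Int)
  | [], _, acc => acc
  | p :: rest, add, acc =>
    let add' := if p.1 = startP then true else add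
    let acc' := if add' then acc ++ [(p.1, line)] else acc
    if p.1 = endP then acc' else pvALoop startP endP line rest add' acc'

def find_full_path (path : List (Int × Int × Int)) (lines : List (Int × List (Int × Int))) : List (Int × Int) :=
  let path_parts := (PySem.List.pyRange 0 (path.length : Int) 2).foldl
    (fun pp i => pp ++ [(PySem.List.pyGetD path i (0, 0, 0), PySem.List.pyGetD path (i + 1) (0, 0, 0))]) []
  path_parts.foldl (fun full_path part =>
    let startP := part.1.1
    let line := part.1.2.2
    let endP := part.2.1
    pvALoop startP endP line ((List.lookup line lines).getD []) false full_path) []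

-- ===== PORT B =====
-- _segment of Source B: the contribution of one (a, b) pair ([] when the segment is skipped)
def pvBSeg (a b : Int × Int × Int) (lines : List (Int × List (Int × Int))) : List (Int × Int) :=
  let startP := a.1
  let line := a.2.2
  let endP := b.1
  let keys := ((List.lookup line lines).getD []).map (fun p => p.1)
  if startP ∈ keys then
    let s := (PySem.List.index? keys startP).getD 0
    let e := if endP ∈ keys then (PySem.List.index? keys endP).getD 0 else keys.length - 1
    if e < s then []
    else (PySem.List.slice keys (some (s : Int)) (some ((e : Int) + 1))).map (fun k => (k, line))
  else []

def find_full_path_alt (path : List (Int × Int × Int)) (lines : List (Int × List (Int × Int))) : List (Int × Int) :=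
  (((PySem.List.slice? path none none 2).getD []).zip ((PySem.List.slice? path (some 1) none 2).getD [])).foldl
    (fun full_path ab => full_path ++ pvBSeg ab.1 ab.2 lines) []

-- ===== PRECONDITION & SPEC =====
-- elements at even positions of a list (the segment-start entries of path)
def pvEvens {α : Type} : List α → List α
  | [] => []
  | [a] => [a]
  | a :: _ :: r => a :: pvEvens r

-- Pre_ excludes exactly the inputs on which Python A raises: an odd-length path
-- (IndexError at path[i+1]) and a segment whose line id is not a key of lines (KeyError at lines[line]).
def Pre_find_full_path (path : List (Int × Int × Int)) (lines : List (Int × List (Int × Int))) : Prop :=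
  path.length % 2 = 0 ∧ ∀ p ∈ pvEvens path, (List.lookup p.2.2 lines).isSome

instance (path : List (Int × Int × Int)) (lines : List (Int × List (Int × Int))) : Decidable (Pre_find_full_path path lines) := by unfold Pre_find_full_path; infer_instance

def pvWitness_find_full_path : (List (Int × Int × Int)) × (List (Int × List (Int × Int))) :=
  ([(1, 0, 7), (3, 0, 7)], [(7, [(1, 5), (2, 6), (3, 4)])])

def Spec_find_full_path (path : List (Int × Int × Int)) (lines : List (Int × List (Int × Int))) (out : List (Int × Int)) : Prop := out = find_full_path_alt path lines
instance (path : List (Int × Int × Int)) (lines : List (Int × List (Int × Int))) (out : List (Int × Int)) : Decidable (Spec_find_full_path path lines out) := by unfold Spec_find_full_path; infer_instance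

-- ===== CLAIM (what is proved, stated in full; the proofs are below) =====
def Claim_equal_find_full_path : Prop := ∀ (path : List (Int × Int × Int)) (lines : List (Int × List (Int × Int))), Dom_find_full_path path lines → Pre_find_full_path path lines → Spec_find_full_path path lines (find_full_path path lines)

-- ===== LEMMAS AND PROOFS =====
def pvOdds {α : Type} : List α → List α
  | [] => []
  | [_] => []
  | _ :: b :: r => b :: pvOdds r

def pvPairs {α : Type} : List α → List (α × α)
  | a :: b :: r => (a, b) :: pvPairs r
  | _ => []

-- B's per-segment computation, phrased on the key list only
def pvBCore (s e l : Int) (keys : List Int) : List (Int × Int) :=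
  if s ∈ keys then
    let si := (PySem.List.index? keys s).getD 0
    let ei := if e ∈ keys then (PySem.List.index? keys e).getD 0 else keys.length - 1
    if ei < si then []
    else (PySem.List.slice keys (some (si : Int)) (some ((ei : Int) + 1))).map (fun k => (k, l))
  else []

theorem pvALoop_acc (startP endP line : Int) (pts : List (Int × Int)) (add : Bool) (acc : List (Int × Int)) :
    pvALoop startP endP line pts add acc = acc ++ pvALoop startP endP line pts add [] := by
  induction pts generalizing add acc with
  | nil => simp [pvALoop]
  | cons p rest ih =>
    simp only [pvALoop]
    split_ifs <;> (try rw [ih]) <;> (try conv_rhs => rw [ih]) <;> simp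

-- the add=true phase of A's inner loop: everything up to the first end_point (inclusive), or all
theorem pvALoop_true (startP endP line : Int) (pts : List (Int × Int)) :
    pvALoop startP endP line pts true [] =
      ((pts.map (fun p => p.1)).take
        ((match PySem.List.index? (pts.map (fun p => p.1)) endP with
          | some i => i
          | none => (pts.map (fun p => p.1)).length - 1) + 1)).map (fun k => (k, line)) := by
  induction pts with
  | nil => simp [pvALoop]
  | cons p rest ih =>
    simp only [pvALoop, ite_self, List.map_cons]
    by_cases he : p.1 = endP
    · rw [PySem.List.index?_eq_idxOf?] at *
      simp [he, List.idxOf?_cons]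
    · rw [if_neg he, pvALoop_acc, ih]
      simp only [PySem.List.index?_cons_of_ne _ he]
      cases hi : PySem.List.index? (rest.map (fun p => p.1)) endP with
      | some i => simp [List.take_succ_cons]
      | none =>
        simp only [Option.map_none]
        have h2 : (p.1 :: List.map (fun p : Int × Int => p.1) rest).length - 1 + 1 = rest.length + 1 := by
          simp
        rw [h2, List.take_succ_cons]
        have h3 : List.take rest.length (List.map (fun p : Int × Int => p.1) rest) =
            List.map (fun p : Int × Int => p.1) rest := List.take_of_length_le (by simp)
        rw [h3]
        rcases rest with _ | ⟨q, rest'⟩ <;> simp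

theorem slice_nat (keys : List Int) (si ei : Nat) :
    PySem.List.slice keys (some (si : Int)) (some ((ei : Int) + 1)) = (keys.drop si).take (ei + 1 - si) := by
  have h : ((ei : Int) + 1) = (((ei + 1 : Nat)) : Int) := by push_cast; ring
  rw [h, PySem.List.slice_natCast]

theorem pvSegCore (s e l : Int) (pts : List (Int × Int)) :
    pvALoop s e l pts false [] = pvBCore s e l (pts.map (fun p => p.1)) := by
  induction pts with
  | nil => simp [pvALoop, pvBCore]
  | cons p rest ih =>
    by_cases hs : p.1 = s
    · have h1 : pvALoop s e l (p :: rest) false [] = pvALoop s e l (p :: rest) true [] := by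
        simp [pvALoop, hs]
      rw [h1, pvALoop_true]
      unfold pvBCore
      rw [if_pos (by simp [← hs])]
      have hsi : PySem.List.index? (List.map (fun p => p.1) (p :: rest)) s = some 0 := by
        rw [List.map_cons, hs]; exact PySem.List.index?_cons_self s _
      simp only [hsi, Option.getD_some]
      cases hei : PySem.List.index? (List.map (fun p => p.1) (p :: rest)) e with
      | some i =>
        have hmem : e ∈ List.map (fun p => p.1) (p :: rest) := by
          rw [← PySem.List.index?_isSome_iff, hei]; rfl
        rw [if_pos hmem]
        simp only [Option.getD_some, Nat.not_lt_zero]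
        rw [slice_nat]
        simp
      | none =>
        have hmem : e ∉ List.map (fun p => p.1) (p :: rest) :=
          (PySem.List.index?_eq_none_iff _ _).mp hei
        rw [if_neg hmem]
        rw [if_neg (Nat.not_lt_zero _)]
        rw [slice_nat]
        simp
    · by_cases he : p.1 = e
      · have hes : ¬e = s := fun h => hs (he.trans h)
        have hL : pvALoop s e l (p :: rest) false [] = [] := by simp [pvALoop, he, hes]
        rw [hL]
        unfold pvBCore
        by_cases hmem : s ∈ List.map (fun p => p.1) (p :: rest)
        · rw [if_pos hmem]
          have hsK : s ∈ List.map (fun p => p.1) rest := by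
            rw [List.map_cons] at hmem
            rcases List.mem_cons.mp hmem with h | h
            · exact absurd h.symm hs
            · exact h
          obtain ⟨si', hsi'⟩ := Option.isSome_iff_exists.mp ((PySem.List.index?_isSome_iff _ _).mpr hsK)
          have hsi : PySem.List.index? (List.map (fun p => p.1) (p :: rest)) s = some (si' + 1) := by
            rw [List.map_cons, PySem.List.index?_cons_of_ne _ hs, hsi']; rfl
          have hei : PySem.List.index? (List.map (fun p => p.1) (p :: rest)) e = some 0 := by
            rw [List.map_cons, he]; exact PySem.List.index?_cons_self e _
          have hemem : e ∈ List.map (fun p => p.1) (p :: rest) := by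
            rw [← PySem.List.index?_isSome_iff, hei]; rfl
          simp only [hsi, hei, Option.getD_some, if_pos hemem]
          rw [if_pos (Nat.zero_lt_succ si')]
        · rw [if_neg hmem]
      · have hL : pvALoop s e l (p :: rest) false [] = pvALoop s e l rest false [] := by
          simp [pvALoop, hs, he]
        rw [hL, ih]
        unfold pvBCore
        by_cases hsK : s ∈ List.map (fun p => p.1) rest
        · have hmem : s ∈ List.map (fun p => p.1) (p :: rest) := by simp [List.mem_cons]; right; simpa using hsK
          rw [if_pos hmem, if_pos hsK]
          obtain ⟨si', hsi'⟩ := Option.isSome_iff_exists.mp ((PySem.List.index?_isSome_iff _ _).mpr hsK)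
          have hsb := PySem.List.getElem_of_index?_eq_some hsi'
          obtain ⟨hsilt, -, -⟩ := hsb
          have hsi : PySem.List.index? (List.map (fun p => p.1) (p :: rest)) s = some (si' + 1) := by
            rw [List.map_cons, PySem.List.index?_cons_of_ne _ hs, hsi']; rfl
          by_cases heK : e ∈ List.map (fun p => p.1) rest
          · have hemem : e ∈ List.map (fun p => p.1) (p :: rest) := by simp [List.mem_cons]; right; simpa using heK
            obtain ⟨ei', hei'⟩ := Option.isSome_iff_exists.mp ((PySem.List.index?_isSome_iff _ _).mpr heK)
            have hei : PySem.List.index? (List.map (fun p => p.1) (p :: rest)) e = some (ei' + 1) := by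
              rw [List.map_cons, PySem.List.index?_cons_of_ne _ he, hei']; rfl
            simp only [hsi, hei, hsi', hei', Option.getD_some, if_pos hemem, if_pos heK]
            by_cases hlt : ei' < si'
            · rw [if_pos hlt, if_pos (show ei' + 1 < si' + 1 from by omega)]
            · rw [if_neg hlt, if_neg (show ¬ei' + 1 < si' + 1 from by omega), slice_nat, slice_nat,
                List.map_cons, List.drop_succ_cons]
              have hc : ei' + 1 + 1 - (si' + 1) = ei' + 1 - si' := by omega
              rw [hc]
          · have hemem : e ∉ List.map (fun p => p.1) (p :: rest) := by
              simp [List.mem_cons]; constructor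
              · exact fun h => he h.symm
              · simpa using heK
            simp only [hsi, hsi', Option.getD_some, if_neg hemem, if_neg heK]
            have hlen : (List.map (fun p => p.1) rest).length = rest.length := List.length_map ..
            have hlen2 : (List.map (fun p => p.1) (p :: rest)).length = rest.length + 1 := by
              simp
            rw [hlen] at hsilt
            rw [hlen, hlen2]
            rw [if_neg (show ¬rest.length - 1 < si' from by omega),
              if_neg (show ¬rest.length + 1 - 1 < si' + 1 from by omega), slice_nat, slice_nat,
              List.map_cons, List.drop_succ_cons]
            have hc : rest.length + 1 - 1 + 1 - (si' + 1) = rest.length - 1 + 1 - si' := by omega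
            rw [hc]
        · have hmem : s ∉ List.map (fun p => p.1) (p :: rest) := by
            simp [List.mem_cons]; constructor
            · exact fun h => hs h.symm
            · simpa using hsK
          rw [if_neg hmem, if_neg hsK]

theorem pvSeg_eq (a b : Int × Int × Int) (lines : List (Int × List (Int × Int))) :
    pvALoop a.1 b.1 a.2.2 ((List.lookup a.2.2 lines).getD []) false [] = pvBSeg a b lines := by
  rw [pvSegCore]; rfl

theorem fm_evens {α : Type} : ∀ xs : List α,
    List.filterMap (fun (k : Nat) => xs[2 * k]?) (List.range ((xs.length + 1) / 2)) = pvEvens xs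
  | [] => by simp [pvEvens]
  | [a] => by simp [pvEvens]
  | a :: b :: r => by
    have ih := fm_evens r
    have hl : ((a :: b :: r).length + 1) / 2 = (r.length + 1) / 2 + 1 := by simp; omega
    have hidx : ∀ k : ℕ, (a :: b :: r)[2 * (k + 1)]? = r[2 * k]? := by
      intro k
      have h2 : 2 * (k + 1) = 2 * k + 1 + 1 := by ring
      simp [h2]
    rw [hl, List.range_succ_eq_map, List.filterMap_cons, List.filterMap_map]
    simp only [Function.comp, Nat.succ_eq_add_one, hidx]
    simp [ih, pvEvens]

theorem fm_odds {α : Type} : ∀ xs : List α,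
    List.filterMap (fun (k : Nat) => xs[2 * k + 1]?) (List.range (xs.length / 2)) = pvOdds xs
  | [] => by simp [pvOdds]
  | [a] => by simp [pvOdds]
  | a :: b :: r => by
    have ih := fm_odds r
    have hl : (a :: b :: r).length / 2 = r.length / 2 + 1 := by simp; omega
    have hidx : ∀ k : ℕ, (a :: b :: r)[2 * (k + 1) + 1]? = r[2 * k + 1]? := by
      intro k
      have h2 : 2 * (k + 1) + 1 = 2 * k + 1 + 1 + 1 := by ring
      simp [h2]
    rw [hl, List.range_succ_eq_map, List.filterMap_cons, List.filterMap_map]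
    simp only [Function.comp, Nat.succ_eq_add_one, hidx]
    simp [ih, pvOdds]

theorem pvEvens_slice {α : Type} (xs : List α) :
    (PySem.List.slice? xs none none 2).getD [] = pvEvens xs := by
  unfold PySem.List.slice? PySem.List.sliceIndices
  norm_num
  have hc : (if 0 < xs.length then (((xs.length : ℤ) + 2 - 1) / 2).toNat else 0)
      = (xs.length + 1) / 2 := by
    split_ifs with h <;> omega
  rw [hc]
  rw [List.filterMap_congr (g := fun (k : Nat) => xs[2 * k]?)
    (fun x _ => by rw [show ((2 : ℤ) * (x : ℤ)).toNat = 2 * x from by omega])]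
  exact fm_evens xs

theorem pvOdds_slice {α : Type} (xs : List α) :
    (PySem.List.slice? xs (some 1) none 2).getD [] = pvOdds xs := by
  unfold PySem.List.slice? PySem.List.sliceIndices
  norm_num
  rcases xs with _ | ⟨a, xs⟩
  · simp [pvOdds]
  · have hmin : min (1 : ℤ) (((a :: xs).length : ℤ)) = 1 := by
      simp only [List.length_cons]; omega
    rw [hmin]
    have hc : (if 1 < (a :: xs).length then ((((a :: xs).length : ℤ) - 1 + 2 - 1) / 2).toNat else 0)
        = (a :: xs).length / 2 := by
      simp only [List.length_cons]
      split_ifs with h <;> omega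
    rw [hc]
    rw [List.filterMap_congr (g := fun (k : Nat) => (a :: xs)[2 * k + 1]?)
      (fun x _ => by rw [show ((1 : ℤ) + 2 * (x : ℤ)).toNat = 2 * x + 1 from by omega])]
    exact fm_odds _

theorem pvZip_pairs {α : Type} : ∀ xs : List α, (pvEvens xs).zip (pvOdds xs) = pvPairs xs
  | [] => rfl
  | [a] => rfl
  | a :: b :: r => by
    simp only [pvEvens, pvOdds, pvPairs, List.zip_cons_cons]
    rw [pvZip_pairs r]

theorem fm_pairs (d : Int × Int × Int) : ∀ xs : List (Int × Int × Int), xs.length % 2 = 0 →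
    (List.range ((xs.length + 1) / 2)).map
      (fun (k : Nat) => (PySem.List.pyGetD xs (2 * (k : ℤ)) d, PySem.List.pyGetD xs (2 * (k : ℤ) + 1) d))
    = pvPairs xs
  | [], _ => by simp [pvPairs]
  | [a], h => by simp at h
  | a :: b :: r, h => by
    have hr : r.length % 2 = 0 := by simp at h; omega
    have ih := fm_pairs d r hr
    have hl : ((a :: b :: r).length + 1) / 2 = (r.length + 1) / 2 + 1 := by simp; omega
    rw [hl, List.range_succ_eq_map, List.map_cons, List.map_map]
    have hhead : PySem.List.pyGetD (a :: b :: r) (2 * ((0 : ℕ) : ℤ)) d = a := by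
      rw [show (2 * ((0 : ℕ) : ℤ)) = ((0 : ℕ) : ℤ) from by norm_num, PySem.List.pyGetD_natCast]
      simp [List.getD]
    have hhead2 : PySem.List.pyGetD (a :: b :: r) (2 * ((0 : ℕ) : ℤ) + 1) d = b := by
      rw [show (2 * ((0 : ℕ) : ℤ) + 1) = ((1 : ℕ) : ℤ) from by norm_num, PySem.List.pyGetD_natCast]
      simp [List.getD]
    rw [hhead, hhead2]
    have htail : ∀ k : ℕ,
        ((fun (k : Nat) => (PySem.List.pyGetD (a :: b :: r) (2 * (k : ℤ)) d,
          PySem.List.pyGetD (a :: b :: r) (2 * (k : ℤ) + 1) d)) ∘ Nat.succ) k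
        = (PySem.List.pyGetD r (2 * (k : ℤ)) d, PySem.List.pyGetD r (2 * (k : ℤ) + 1) d) := by
      intro k
      simp only [Function.comp]
      have h2 : 2 * ((Nat.succ k : ℕ) : ℤ) = ((2 * k + 2 : ℕ) : ℤ) := by push_cast; ring
      have h3 : 2 * ((Nat.succ k : ℕ) : ℤ) + 1 = ((2 * k + 3 : ℕ) : ℤ) := by push_cast; ring
      have h4 : 2 * (k : ℤ) = ((2 * k : ℕ) : ℤ) := by push_cast; ring
      have h5 : 2 * (k : ℤ) + 1 = ((2 * k + 1 : ℕ) : ℤ) := by push_cast; ring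
      rw [h3, h2, h5, h4, PySem.List.pyGetD_natCast, PySem.List.pyGetD_natCast,
        PySem.List.pyGetD_natCast, PySem.List.pyGetD_natCast]
      simp [List.getD]
    rw [List.map_congr_left (fun k _ => htail k), ih, pvPairs]

theorem pvParts_pairs (path : List (Int × Int × Int)) (h : path.length % 2 = 0) :
    (PySem.List.pyRange 0 (path.length : Int) 2).foldl
      (fun pp i => pp ++ [(PySem.List.pyGetD path i (0, 0, 0), PySem.List.pyGetD path (i + 1) (0, 0, 0))]) []
    = pvPairs path := by
  rw [PySem.List.foldl_append_singleton_eq_map, PySem.List.pyRange_of_pos 0 (path.length : Int) (by norm_num),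
    List.map_map]
  have hc : (List.range (if (0 : ℤ) < (path.length : ℤ) then (((path.length : ℤ) - 0 + 2 - 1) / 2).toNat else 0))
      = List.range ((path.length + 1) / 2) := by
    congr 1
    split_ifs with h' <;> omega
  rw [hc]
  rw [List.map_congr_left (fun k _ => by
    show (PySem.List.pyGetD path (0 + 2 * (k : ℤ)) (0, 0, 0), PySem.List.pyGetD path (0 + 2 * (k : ℤ) + 1) (0, 0, 0))
      = (PySem.List.pyGetD path (2 * (k : ℤ)) (0, 0, 0), PySem.List.pyGetD path (2 * (k : ℤ) + 1) (0, 0, 0))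
    norm_num)]
  simpa using fm_pairs (0, 0, 0) path h

-- ===== VERDICT (by name: the statement is the Claim_ definition above) =====
theorem find_full_path_spec : Claim_equal_find_full_path := by
  intro path lines _ hpre
  unfold Spec_find_full_path find_full_path find_full_path_alt
  rw [pvParts_pairs path hpre.1, pvEvens_slice, pvOdds_slice, pvZip_pairs]
  induction pvPairs path using List.reverseRecOn with
  | nil => rfl
  | append_singleton l x ih =>
      rw [List.foldl_append, List.foldl_append, ih]
      simp only [List.foldl_cons, List.foldl_nil]
      rw [pvALoop_acc, pvSeg_eq]
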